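-- pv_equiv track=rewrite | github.com/netra-systems/zen | netra_backend/app/middleware/fastapi_auth_middleware.py | _detect_circular_request
-- ===== SOURCE A (Python) =====
-- def _detect_circular_request(request_chain: str) -> bool:
--     """Detect circular requests in the chain.
--
--     Args:
--         request_chain: Request chain string (e.g., "service_a->service_b->service_a")
--
--     Returns:
--         True if circular request detected
--     """
--     if not request_chain:
--         return False
--
--     services = request_chain.split("->")
--     seen_services = set()
--
--     for service in services:
--         if service in seen_services:
--             return True
--         seen_services.add(service)
--
--     return False
-- ===== SOURCE B (Python) =====
-- def _detect_circular_request(request_chain: str) -> bool: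
--     """Detect circular requests in the chain (sort-then-adjacent-scan)."""
--     services = sorted(request_chain.split("->"))
--     return any(a == b for a, b in zip(services, services[1:]))
-- ===== Notes on version B (the rewrite author's own statement) =====
-- stated objective: alternative
-- what changed: Replaces the early-exit scan with an incremental seen-set (plus the empty-string guard) by a sort-then-scan: sort the split services and report whether any two adjacent entries are equal; after sorting, a duplicate exists iff some adjacent pair coincides.
import Mathlib
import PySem

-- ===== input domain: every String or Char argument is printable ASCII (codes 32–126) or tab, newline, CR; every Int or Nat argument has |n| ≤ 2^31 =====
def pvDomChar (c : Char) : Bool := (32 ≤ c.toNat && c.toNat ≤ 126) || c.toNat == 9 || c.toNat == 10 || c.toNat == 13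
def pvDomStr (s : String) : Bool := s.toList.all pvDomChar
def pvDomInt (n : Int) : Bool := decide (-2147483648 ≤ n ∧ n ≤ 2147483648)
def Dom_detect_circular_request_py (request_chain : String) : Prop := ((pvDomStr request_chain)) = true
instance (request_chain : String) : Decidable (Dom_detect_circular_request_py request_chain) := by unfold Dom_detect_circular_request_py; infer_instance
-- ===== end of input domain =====

-- B replaces A's early-exit scan with an incremental seen-set by a sort-then-adjacent-scan:
-- sort the split services and report whether any two adjacent entries coincide.

-- ===== PORT A =====
-- the 'for service in services' loop with early 'return True'
def pvLoopA (services : List String) (seen : PySem.Set String) : Bool :=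
  match services with
  | [] => false
  | service :: rest =>
      if PySem.Set.contains seen service then true
      else pvLoopA rest (PySem.Set.add seen service)

def detect_circular_request_py (request_chain : String) : Bool :=
  if request_chain = "" then false
  else pvLoopA ((PySem.Str.split? request_chain "->").getD []) PySem.Set.empty

-- ===== PORT B =====
def detect_circular_request_py_alt (request_chain : String) : Bool :=
  let services := PySem.List.sorted ((PySem.Str.split? request_chain "->").getD []) (fun x => x) false
  (services.zip (PySem.List.slice services (some 1) none)).any (fun p => p.1 == p.2)

-- ===== PRECONDITION & SPEC =====
def Spec_detect_circular_request_py (request_chain : String) (out : Bool) : Prop := out = detect_circular_request_py_alt request_chain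
instance (request_chain : String) (out : Bool) : Decidable (Spec_detect_circular_request_py request_chain out) := by unfold Spec_detect_circular_request_py; infer_instance

-- ===== CLAIM (what is proved, stated in full; the proofs are below) =====
def Claim_equal_detect_circular_request_py : Prop := ∀ (request_chain : String), Dom_detect_circular_request_py request_chain → Spec_detect_circular_request_py request_chain (detect_circular_request_py request_chain)

-- ===== LEMMAS AND PROOFS =====

-- A's loop detects exactly: a duplicate in the list, or an element already seen
theorem pv_loopA_eq (xs : List String) (s : PySem.Set String) :
    pvLoopA xs s = decide (¬ (xs.Nodup ∧ ∀ x ∈ xs, x ∉ s)) := by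
  induction xs generalizing s with
  | nil => simp [pvLoopA]
  | cons x rest ih =>
      by_cases hx : x ∈ s
      · have hc : PySem.Set.contains s x = true := by simp [PySem.Set.contains, hx]
        simp only [pvLoopA, hc]
        refine (decide_eq_true ?_).symm
        rintro ⟨_, hall⟩
        exact hall x (by simp) hx
      · have hc : PySem.Set.contains s x = false := by
          simp [PySem.Set.contains, hx]
        simp only [pvLoopA, hc, Bool.false_eq_true, if_false]
        rw [ih]
        simp only [decide_eq_decide, PySem.Set.mem_add, List.nodup_cons, List.mem_cons,
          not_or]
        constructor
        · rintro h ⟨⟨hnx, hnd⟩, hall⟩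
          exact h ⟨hnd, fun y hy => ⟨hall y (Or.inr hy), fun he => hnx (he ▸ hy)⟩⟩
        · rintro h ⟨hnd, hall⟩
          refine h ⟨⟨fun hxr => (hall x hxr).2 rfl, hnd⟩, fun y hy => ?_⟩
          rcases hy with rfl | hy
          · exact hx
          · exact (hall y hy).1

-- on a ≤-sorted list, an adjacent coincidence is exactly a duplicate
theorem pv_adj_eq (ys : List String) (h : ys.Pairwise (· ≤ ·)) :
    ((ys.zip ys.tail).any fun p => p.1 == p.2) = decide (¬ ys.Nodup) := by
  induction ys with
  | nil => simp
  | cons a t ih =>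
      cases t with
      | nil => simp
      | cons b t' =>
          have hp := h
          rw [List.pairwise_cons] at hp
          obtain ⟨hale, htail⟩ := hp
          by_cases hab : a = b
          · subst hab
            simp [List.zip, List.any_cons]
          · have hrest := ih htail
            have hnot : a ∉ b :: t' := by
              intro hmem
              rcases List.mem_cons.mp hmem with h1 | h1
              · exact hab h1
              · have h1' : a ∈ t' := h1
                have hab' : a ≤ b := hale b (by simp)
                have hba : b ≤ a := by
                  rw [List.pairwise_cons] at htail
                  exact htail.1 a h1'
                exact hab (le_antisymm hab' hba)
            simp only [List.tail_cons] at hrest ⊢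
            have hzip : (a :: b :: t').zip (b :: t') = (a, b) :: ((b :: t').zip t') := rfl
            rw [hzip, List.any_cons, hrest]
            have hbeq : (a == b) = false := by simp [hab]
            rw [hbeq, Bool.false_or]
            have hiff : (a :: b :: t').Nodup ↔ (b :: t').Nodup := by
              constructor
              · exact fun hnd => (List.nodup_cons.mp hnd).2
              · exact fun hnd => List.nodup_cons.mpr ⟨hnot, hnd⟩
            simp [hiff]

-- ===== VERDICT (by name: the statement is the Claim_ definition above) =====
theorem detect_circular_request_py_spec : Claim_equal_detect_circular_request_py := by
  intro rc _
  unfold Spec_detect_circular_request_py detect_circular_request_py detect_circular_request_py_alt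
  set xs := (PySem.Str.split? rc "->").getD [] with hxs
  have hsortedP : (PySem.List.sorted xs (fun x => x) false).Pairwise (· ≤ ·) := by
    simpa using PySem.List.sorted_pairwise xs (fun x => x)
  have hperm : (PySem.List.sorted xs (fun x => x) false).Perm xs :=
    PySem.List.sorted_perm xs (fun x => x) false
  have halt :
      ((PySem.List.sorted xs (fun x => x) false).zip
        (PySem.List.slice (PySem.List.sorted xs (fun x => x) false) (some 1) none)).any
        (fun p => p.1 == p.2) = decide (¬ xs.Nodup) := by
    rw [PySem.List.slice_from_one, pv_adj_eq _ hsortedP]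
    simp [hperm.nodup_iff]
  by_cases h : rc = ""
  · subst h
    rw [if_pos rfl]
    simp only [halt]
    have : xs = [""] := by decide
    rw [this]; decide
  · rw [if_neg h, pv_loopA_eq, halt]
    simp only [decide_eq_decide]
    constructor
    · intro hn hnd
      exact hn ⟨hnd, fun x _ => by simp [PySem.Set.empty]⟩
    · rintro hn ⟨hnd, _⟩
      exact hn hnd
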